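-- pv_equiv track=rewrite | github.com/sebastianvargasisaza-prog/Inventarios | api/comprobante_pago.py | parse_obs_beneficiario
-- ===== SOURCE A (Python) =====
-- def parse_obs_beneficiario(obs_str):
--     """Extrae datos de beneficiario desde el string OBS estructurado.
--
--     Formato esperado (generado por marketing.py al crear SOLs de influencer):
--       BENEFICIARIO: {nombre} | BANCO: {banco} {tipo} | CUENTA/CEL: {cuenta} |
--       CED/NIT: {cedula} | CONCEPTO: {x} | VALOR: ${x}
--
--     Devuelve dict con las claves del beneficiario, todas pueden ser "".
--     """
--     result = {"nombre": "", "banco": "", "tipo_cuenta": "", "cuenta": "",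
--               "cedula": "", "email": "", "ciudad": ""}
--     if not obs_str:
--         return result
--     for part in obs_str.split("|"):
--         part = part.strip()
--         if part.upper().startswith("BENEFICIARIO:"):
--             result["nombre"] = part.split(":", 1)[1].strip()
--         elif part.upper().startswith("BANCO:"):
--             banco_raw = part.split(":", 1)[1].strip()
--             # "Bancolombia Ahorros" → banco="Bancolombia", tipo_cuenta="Ahorros"
--             tokens = banco_raw.split()
--             if len(tokens) >= 2:
--                 result["banco"] = " ".join(tokens[:-1])
--                 result["tipo_cuenta"] = tokens[-1]
--             else:
--                 result["banco"] = banco_raw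
--         elif part.upper().startswith("CUENTA/CEL:"):
--             result["cuenta"] = part.split(":", 1)[1].strip()
--         elif part.upper().startswith("CED/NIT:"):
--             result["cedula"] = part.split(":", 1)[1].strip()
--     return result
-- ===== SOURCE B (Python) =====
-- _FIELD_FOR = {"BENEFICIARIO": "nombre", "CUENTA/CEL": "cuenta", "CED/NIT": "cedula"}
--
--
-- def parse_obs_beneficiario(obs_str):
--     """Two-phase parse: collect the labelled segments into a dict, then fill
--     the result fields from it (BANCO holds "banco [tipo_cuenta]")."""
--     fields = {}
--     for part in (obs_str or "").split("|"):
--         bits = part.strip().split(":", 1)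
--         if len(bits) == 2:
--             fields[bits[0].upper()] = bits[1].strip()
--
--     result = {"nombre": "", "banco": "", "tipo_cuenta": "", "cuenta": "",
--               "cedula": "", "email": "", "ciudad": ""}
--     for label, key in _FIELD_FOR.items():
--         if label in fields:
--             result[key] = fields[label]
--     if "BANCO" in fields:
--         banco = fields["BANCO"]
--         tokens = banco.split()
--         if len(tokens) >= 2:
--             result["banco"] = " ".join(tokens[:-1])
--             result["tipo_cuenta"] = tokens[-1]
--         else:
--             result["banco"] = banco
--     return result
-- ===== Notes on version B (the rewrite author's own statement) =====
-- stated objective: alternative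
-- what changed: Replaces A's single pass of startswith-guarded in-place dict updates by a two-phase algorithm: one pass collects the colon-labelled segments into a label-keyed dict (last write wins), then the result fields are filled from that dict, with the BANCO token split applied once at assembly time.
-- intended difference: On strings with several BANCO segments where the last has fewer than 2 tokens but an earlier one has 2 or more, A returns a tipo_cuenta taken from the earlier segment while banco comes from the last; B fills both banco and tipo_cuenta from the last BANCO segment, the intended reading of the one-segment format. — e.g. on parse_obs_beneficiario(some "BANCO: A B | BANCO: C"): A returns [("nombre", ""), ("banco", "C"), ("tipo_cuenta", "B"), ("cuenta", ""), ("cedula", ""), ("email", ""), ("ciudad", "")], B returns [("nombre", ""), ("banco", "C"), ("tipo_cuenta", ""), ("cuenta", ""), ("cedula", ""), ("email", ""), ("ciudad", "")]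
import Mathlib
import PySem

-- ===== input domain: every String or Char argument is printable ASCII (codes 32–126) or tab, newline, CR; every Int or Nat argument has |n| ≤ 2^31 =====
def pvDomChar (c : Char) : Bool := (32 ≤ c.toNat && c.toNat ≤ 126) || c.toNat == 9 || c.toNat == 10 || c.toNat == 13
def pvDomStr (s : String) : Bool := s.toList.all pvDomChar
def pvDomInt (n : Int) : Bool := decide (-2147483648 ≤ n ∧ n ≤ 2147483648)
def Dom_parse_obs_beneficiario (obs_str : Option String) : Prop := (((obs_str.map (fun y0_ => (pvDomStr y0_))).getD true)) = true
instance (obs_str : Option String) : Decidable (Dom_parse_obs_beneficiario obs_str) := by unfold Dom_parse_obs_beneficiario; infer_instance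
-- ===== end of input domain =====

-- B is a two-phase rewrite (collect labelled segments into a dict, then fill the result fields from it); on inputs with duplicate BANCO segments where A accidentally mixes two segments' data, B takes everything from the last BANCO segment (stated as D_).


-- ===== PORT A =====
-- helper: A's per-part dict update
def pvStepA (d : PySem.Dict String String) (part0 : String) : PySem.Dict String String :=
  let part := PySem.Str.strip part0
  -- part.split(":", 1)[1]: index 1 exists whenever a startswith guard below holds
  let after := PySem.Str.strip (PySem.List.pyGetD ((PySem.Str.splitMax? part ":" 1).getD []) 1 "")
  if PySem.Str.startswith (PySem.Str.upper part) "BENEFICIARIO:" then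
    d.insert "nombre" after
  else if PySem.Str.startswith (PySem.Str.upper part) "BANCO:" then
    let tokens := PySem.Str.split₀ after
    if 2 ≤ tokens.length then
      (d.insert "banco" (PySem.Str.join " " (PySem.List.slice tokens none (some (-1))))).insert
        "tipo_cuenta" ((PySem.List.pyGet? tokens (-1)).getD "")   -- tokens[-1], nonempty by guard
    else d.insert "banco" after
  else if PySem.Str.startswith (PySem.Str.upper part) "CUENTA/CEL:" then
    d.insert "cuenta" after
  else if PySem.Str.startswith (PySem.Str.upper part) "CED/NIT:" then
    d.insert "cedula" after
  else d

def pvInitDict : PySem.Dict String String :=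
  PySem.Dict.ofList [("nombre", ""), ("banco", ""), ("tipo_cuenta", ""), ("cuenta", ""),
    ("cedula", ""), ("email", ""), ("ciudad", "")]

def parse_obs_beneficiario (obs_str : Option String) : List (String × String) :=
  match obs_str with
  | none => pvInitDict.items
  | some s =>
    if s = "" then pvInitDict.items
    else (((PySem.Str.split? s "|").getD []).foldl pvStepA pvInitDict).items

-- ===== PORT B =====
-- phase 1 of Source B: fields = {LABEL.upper(): value.strip() for colon-split parts}
def pvFields (s : String) : PySem.Dict String String :=
  ((PySem.Str.split? s "|").getD []).foldl (fun d part =>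
    let bits := (PySem.Str.splitMax? (PySem.Str.strip part) ":" 1).getD []
    if bits.length == 2 then
      d.insert (PySem.Str.upper (PySem.List.pyGetD bits 0 ""))
        (PySem.Str.strip (PySem.List.pyGetD bits 1 ""))
    else d) PySem.Dict.empty

def parse_obs_beneficiario_alt (obs_str : Option String) : List (String × String) :=
  let fields := pvFields (obs_str.getD "")
  let result := pvInitDict
  let result := [("BENEFICIARIO", "nombre"), ("CUENTA/CEL", "cuenta"), ("CED/NIT", "cedula")].foldl
    (fun d lk => match fields.get? lk.1 with
      | some v => d.insert lk.2 v
      | none => d) result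
  let result := match fields.get? "BANCO" with
    | some banco =>
      let tokens := PySem.Str.split₀ banco
      if 2 ≤ tokens.length then
        (result.insert "banco" (PySem.Str.join " " (PySem.List.slice tokens none (some (-1))))).insert
          "tipo_cuenta" ((PySem.List.pyGet? tokens (-1)).getD "")
      else result.insert "banco" banco
    | none => result
  result.items

-- ===== PRECONDITION & SPEC =====
-- On inputs with several BANCO-labelled segments where the last has fewer than 2 tokens but an earlier
-- one has ≥ 2, A returns a tipo_cuenta mixed in from the earlier segment while banco comes from the last;
-- B fills both banco and tipo_cuenta from the last BANCO segment, the intended reading of the format.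
def pvTrim (l : List Char) : List Char :=
  ((l.dropWhile PySem.Chars.isspace).reverse.dropWhile PySem.Chars.isspace).reverse

-- the trimmed text after the colon of a '|'-segment whose case-folded head reads "BANCO:", if any
def pvBancoSeg (part : List Char) : Option (List Char) :=
  if ((pvTrim part).map PySem.Chars.upperChar).take 6 = "BANCO:".toList then
    some (pvTrim (((pvTrim part).dropWhile (· ≠ ':')).tail))
  else none

def D_parse_obs_beneficiario (obs_str : Option String) : Prop :=
  match obs_str with
  | none => False
  | some s =>
    (s.toList.splitOn '|').filterMap pvBancoSeg ≠ [] ∧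
    (PySem.Chars.split₀ (((s.toList.splitOn '|').filterMap pvBancoSeg).getLastD [])).length < 2 ∧
    ∃ w ∈ (s.toList.splitOn '|').filterMap pvBancoSeg, 2 ≤ (PySem.Chars.split₀ w).length
instance (obs_str : Option String) : Decidable (D_parse_obs_beneficiario obs_str) := by
  unfold D_parse_obs_beneficiario; cases obs_str <;> dsimp only <;> infer_instance

def Spec_parse_obs_beneficiario (obs_str : Option String) (out : List (String × String)) : Prop := ¬ D_parse_obs_beneficiario obs_str → out = parse_obs_beneficiario_alt obs_str
instance (obs_str : Option String) (out : List (String × String)) : Decidable (Spec_parse_obs_beneficiario obs_str out) := by unfold Spec_parse_obs_beneficiario; infer_instance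

def pvDiffWitness_parse_obs_beneficiario : Option String := some "BANCO: A B | BANCO: C"
def pvDiffWitnessOut_parse_obs_beneficiario : (List (String × String)) × (List (String × String)) :=
  ([("nombre", ""), ("banco", "C"), ("tipo_cuenta", "B"), ("cuenta", ""), ("cedula", ""), ("email", ""), ("ciudad", "")],
   [("nombre", ""), ("banco", "C"), ("tipo_cuenta", ""), ("cuenta", ""), ("cedula", ""), ("email", ""), ("ciudad", "")])

-- ===== CLAIM =====
def Claim_unchanged_parse_obs_beneficiario : Prop := ∀ (obs_str : Option String), Dom_parse_obs_beneficiario obs_str → Spec_parse_obs_beneficiario obs_str (parse_obs_beneficiario obs_str)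
def Claim_exact_parse_obs_beneficiario : Prop := ∀ (obs_str : Option String), Dom_parse_obs_beneficiario obs_str → D_parse_obs_beneficiario obs_str → parse_obs_beneficiario obs_str ≠ parse_obs_beneficiario_alt obs_str
def Claim_changed_parse_obs_beneficiario : Prop := Dom_parse_obs_beneficiario (pvDiffWitness_parse_obs_beneficiario) ∧ D_parse_obs_beneficiario (pvDiffWitness_parse_obs_beneficiario) ∧ parse_obs_beneficiario (pvDiffWitness_parse_obs_beneficiario) = pvDiffWitnessOut_parse_obs_beneficiario.1 ∧ parse_obs_beneficiario_alt (pvDiffWitness_parse_obs_beneficiario) = pvDiffWitnessOut_parse_obs_beneficiario.2 ∧ pvDiffWitnessOut_parse_obs_beneficiario.1 ≠ pvDiffWitnessOut_parse_obs_beneficiario.2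

-- ===== LEMMAS AND PROOFS =====
def preC (l : List Char) : List Char := l.takeWhile (· ≠ ':')
def postC (l : List Char) : List Char := (l.dropWhile (· ≠ ':')).tail

theorem go0 (fuel : Nat) (l cur : List Char) (acc : List (List Char)) :
    PySem.Chars.splitOnMax.go [':'] fuel 0 l cur acc = ((cur.reverse ++ l) :: acc).reverse := by
  cases fuel with
  | zero => rfl
  | succ f => cases l with
    | nil => simp [PySem.Chars.splitOnMax.go]
    | cons c rest => simp [PySem.Chars.splitOnMax.go]

theorem goMain (l : List Char) : ∀ (fuel : Nat) (cur : List Char) (acc : List (List Char)),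
    l.length ≤ fuel →
    PySem.Chars.splitOnMax.go [':'] fuel 1 l cur acc =
      if ':' ∈ l then (postC l :: (cur.reverse ++ preC l) :: acc).reverse
      else ((cur.reverse ++ l) :: acc).reverse := by
  induction l with
  | nil => intro fuel cur acc _; cases fuel <;> simp [PySem.Chars.splitOnMax.go]
  | cons c rest ih =>
    intro fuel cur acc hle
    cases fuel with
    | zero => simp at hle
    | succ f =>
      by_cases hc : c = ':'
      · subst hc
        simp [PySem.Chars.splitOnMax.go, go0, preC, postC, List.isPrefixOf]
      · have hpre : [':'].isPrefixOf (c :: rest) = false := by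
          simp [List.isPrefixOf]; exact fun h => (hc h.symm).elim
        rw [PySem.Chars.splitOnMax.go]
        simp only [hpre, if_neg (by omega : ¬ (1:Nat) = 0)]
        rw [ih f (c :: cur) acc (by simpa using hle)]
        simp [preC, postC, hc, Ne.symm hc]

theorem splitColon1 (l : List Char) :
    PySem.Chars.splitMax? l [':'] 1 = some (if ':' ∈ l then [preC l, postC l] else [l]) := by
  simp [PySem.Chars.splitMax?, PySem.Chars.splitOnMax, goMain l (l.length + 1) [] [] (by omega)]

theorem upperChar_colon_iff (c : Char) : PySem.Chars.upperChar c = ':' ↔ c = ':' := by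
  unfold PySem.Chars.upperChar PySem.Chars.islower
  split
  · rename_i h
    simp only [Bool.and_eq_true, decide_eq_true_eq, Char.le_def, UInt32.le_iff_toNat_le] at h
    have hlo : 97 ≤ c.toNat := h.1
    have hhi : c.toNat ≤ 122 := h.2
    constructor
    · intro he
      have h2 : (Char.ofNat (c.toNat - 32)).toNat = (':' : Char).toNat := by rw [he]
      rw [Char.toNat_ofNat, if_pos (by left; omega)] at h2
      have h58 : (':' : Char).toNat = 58 := by decide
      omega
    · intro he
      subst he
      have h58 : (':' : Char).toNat = 58 := by decide
      omega
  · simp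

theorem takeWhile_eq_self_of_all {α : Type} (p : α → Bool) (l : List α) (h : ∀ x ∈ l, p x = true) :
    List.takeWhile p l = l := by
  induction l with
  | nil => rfl
  | cons a t ih => simp [List.takeWhile_cons, h a (by simp), ih fun x hx => h x (by simp [hx])]

theorem mem_of_startswith_upper (l L : List Char) (hL : ':' ∉ L) :
    PySem.Chars.startswith (PySem.Chars.upper l) (L ++ [':']) = true ↔
      ':' ∈ l ∧ PySem.Chars.upper (preC l) = L := by
  rw [PySem.Chars.startswith_iff]
  constructor
  · rintro ⟨t, ht⟩
    unfold PySem.Chars.upper at ht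
    rw [List.append_assoc, List.singleton_append] at ht
    obtain ⟨l1, l2, hl, h1, h2⟩ := List.map_eq_append_iff.mp ht.symm
    obtain ⟨c0, l2', hl2, hc0, h3⟩ := List.map_eq_cons_iff.mp h2
    have hc0' : c0 = ':' := (upperChar_colon_iff c0).mp hc0
    subst hc0'
    have hl1 : ∀ x ∈ l1, (decide (x ≠ ':')) = true := by
      intro x hx
      simp only [decide_eq_true_eq]
      intro he
      subst he
      exact hL (h1 ▸ List.mem_map_of_mem hx)
    refine ⟨?_, ?_⟩
    · rw [hl, hl2]; simp
    · have hpre : preC l = l1 := by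
        rw [preC, hl, hl2, List.takeWhile_append,
          if_pos (by rw [takeWhile_eq_self_of_all _ _ hl1])]
        simp
      rw [hpre]; exact h1
  · rintro ⟨hmem, hpre⟩
    have hdw : l.dropWhile (fun x => decide (x ≠ ':')) ≠ [] := by
      intro h
      have := List.dropWhile_eq_nil_iff.mp h ':' hmem
      simp at this
    have hhead : (l.dropWhile (fun x => decide (x ≠ ':'))).head hdw = ':' := by
      have := List.head_dropWhile_not (fun x => decide (x ≠ ':')) hdw
      simpa using this
    have hdec : l = preC l ++ ':' :: postC l := by
      have hct := List.cons_head_tail hdw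
      rw [hhead] at hct
      calc l = l.takeWhile (fun x => decide (x ≠ ':')) ++ l.dropWhile (fun x => decide (x ≠ ':')) :=
            (List.takeWhile_append_dropWhile).symm
        _ = preC l ++ ':' :: postC l := by rw [← hct]; rfl
    have hkey : PySem.Chars.upper l = L ++ [':'] ++ PySem.Chars.upper (postC l) := by
      conv_lhs => rw [hdec]
      unfold PySem.Chars.upper at hpre ⊢
      rw [List.map_append, List.map_cons, hpre]
      simp
      decide
    exact ⟨PySem.Chars.upper (postC l), hkey.symm⟩

-- the (label, value) reading of one part, common to both sides
def pvC (part : String) : Option (String × String) :=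
  let bits := (PySem.Str.splitMax? (PySem.Str.strip part) ":" 1).getD []
  if bits.length == 2 then
    some (PySem.Str.upper (PySem.List.pyGetD bits 0 ""), PySem.Str.strip (PySem.List.pyGetD bits 1 ""))
  else none

def pvBancoUpd (d : PySem.Dict String String) (v : String) : PySem.Dict String String :=
  let tokens := PySem.Str.split₀ v
  if 2 ≤ tokens.length then
    (d.insert "banco" (PySem.Str.join " " (PySem.List.slice tokens none (some (-1))))).insert
      "tipo_cuenta" ((PySem.List.pyGet? tokens (-1)).getD "")
  else d.insert "banco" v

def pvG (d : PySem.Dict String String) (p : String × String) : PySem.Dict String String :=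
  if p.1 = "BENEFICIARIO" then d.insert "nombre" p.2
  else if p.1 = "BANCO" then pvBancoUpd d p.2
  else if p.1 = "CUENTA/CEL" then d.insert "cuenta" p.2
  else if p.1 = "CED/NIT" then d.insert "cedula" p.2
  else d

theorem upper_ofList_eq_iff (cs : List Char) (P : String) :
    PySem.Str.upper (String.ofList cs) = P ↔ PySem.Chars.upper cs = P.toList := by
  rw [← String.toList_inj]
  simp

theorem stepA_eq (d : PySem.Dict String String) (part : String) :
    pvStepA d part = (pvC part).elim d (pvG d) := by
  have G : ∀ (L : List Char) (P : String), P.toList = L ++ [':'] → ':' ∉ L →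
      ((PySem.Str.startswith (PySem.Str.upper (PySem.Str.strip part)) P = true) ↔
        (':' ∈ (PySem.Str.strip part).toList ∧
          PySem.Chars.upper (preC (PySem.Str.strip part).toList) = L)) := by
    intro L P hP hL
    rw [show PySem.Str.startswith (PySem.Str.upper (PySem.Str.strip part)) P =
        PySem.Chars.startswith (PySem.Chars.upper (PySem.Str.strip part).toList) P.toList from by
      simp]
    rw [hP]
    exact mem_of_startswith_upper _ _ hL
  by_cases hmem : ':' ∈ (PySem.Str.strip part).toList
  · have hb : PySem.Str.splitMax? (PySem.Str.strip part) ":" 1 =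
        some [String.ofList (preC (PySem.Str.strip part).toList),
              String.ofList (postC (PySem.Str.strip part).toList)] := by
      rw [PySem.Str.splitMax?, show (":" : String).toList = [':'] from rfl,
        splitColon1, if_pos hmem]
      rfl
    simp only [pvStepA, pvC]
    rw [hb]
    simp only [Option.getD_some, List.length_cons, List.length_nil, Option.elim,
      show ((0 + 1 + 1 : Nat) == 2) = true from rfl, if_true]
    simp only [G "BENEFICIARIO".toList "BENEFICIARIO:" rfl (by decide),
      G "BANCO".toList "BANCO:" rfl (by decide),
      G "CUENTA/CEL".toList "CUENTA/CEL:" rfl (by decide),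
      G "CED/NIT".toList "CED/NIT:" rfl (by decide), hmem, true_and]
    simp only [pvG, pvBancoUpd]
    have hget : PySem.List.pyGetD
        [String.ofList (preC (PySem.Str.strip part).toList),
         String.ofList (postC (PySem.Str.strip part).toList)] 1 "" =
        String.ofList (postC (PySem.Str.strip part).toList) := by
      simp [PySem.List.pyGetD, PySem.List.pyGet?, PySem.List.pyIdx?]
    have hget0 : PySem.List.pyGetD
        [String.ofList (preC (PySem.Str.strip part).toList),
         String.ofList (postC (PySem.Str.strip part).toList)] 0 "" =
        String.ofList (preC (PySem.Str.strip part).toList) := by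
      simp [PySem.List.pyGetD, PySem.List.pyGet?, PySem.List.pyIdx?]
    rw [hget, hget0]
    by_cases h1 : PySem.Chars.upper (preC (PySem.Str.strip part).toList) = "BENEFICIARIO".toList <;>
      by_cases h2 : PySem.Chars.upper (preC (PySem.Str.strip part).toList) = "BANCO".toList <;>
      by_cases h3 : PySem.Chars.upper (preC (PySem.Str.strip part).toList) = "CUENTA/CEL".toList <;>
      by_cases h4 : PySem.Chars.upper (preC (PySem.Str.strip part).toList) = "CED/NIT".toList <;>
      simp [h1, h2, h3, h4, upper_ofList_eq_iff]
  · have hb : PySem.Str.splitMax? (PySem.Str.strip part) ":" 1 =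
        some [String.ofList (PySem.Str.strip part).toList] := by
      rw [PySem.Str.splitMax?, show (":" : String).toList = [':'] from rfl,
        splitColon1, if_neg hmem]
      rfl
    simp only [pvStepA, pvC]
    rw [hb]
    simp only [Option.getD_some, List.length_cons, List.length_nil, Option.elim]
    simp only [G "BENEFICIARIO".toList "BENEFICIARIO:" rfl (by decide),
      G "BANCO".toList "BANCO:" rfl (by decide),
      G "CUENTA/CEL".toList "CUENTA/CEL:" rfl (by decide),
      G "CED/NIT".toList "CED/NIT:" rfl (by decide), hmem, false_and]
    simp

def mk7 (n b t c ce : String) : PySem.Dict String String :=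
  PySem.Dict.mk [("nombre", n), ("banco", b), ("tipo_cuenta", t), ("cuenta", c),
    ("cedula", ce), ("email", ""), ("ciudad", "")]

theorem init_eq_mk7 : pvInitDict = mk7 "" "" "" "" "" := by decide

theorem ins_nombre (n b t c ce v : String) : (mk7 n b t c ce).insert "nombre" v = mk7 v b t c ce := rfl
theorem ins_banco (n b t c ce v : String) : (mk7 n b t c ce).insert "banco" v = mk7 n v t c ce := rfl
theorem ins_tipo (n b t c ce v : String) : (mk7 n b t c ce).insert "tipo_cuenta" v = mk7 n b v c ce := rfl
theorem ins_cuenta (n b t c ce v : String) : (mk7 n b t c ce).insert "cuenta" v = mk7 n b t v ce := rfl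
theorem ins_cedula (n b t c ce v : String) : (mk7 n b t c ce).insert "cedula" v = mk7 n b t c v := rfl

def pvLast (pairs : List (String × String)) (pred : String × String → Bool) : Option String :=
  (pairs.reverse.find? pred).map (·.2)

def pvPairs (s : String) : List (String × String) :=
  ((PySem.Str.split? s "|").getD []).filterMap pvC

def pvBval (b : String) : String :=
  if 2 ≤ (PySem.Str.split₀ b).length then
    PySem.Str.join " " (PySem.List.slice (PySem.Str.split₀ b) none (some (-1)))
  else b

def nomV (pairs : List (String × String)) : String :=
  (pvLast pairs (fun p => p.1 == "BENEFICIARIO")).getD ""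
def cuV (pairs : List (String × String)) : String :=
  (pvLast pairs (fun p => p.1 == "CUENTA/CEL")).getD ""
def ceV (pairs : List (String × String)) : String :=
  (pvLast pairs (fun p => p.1 == "CED/NIT")).getD ""
def banV (pairs : List (String × String)) : String :=
  match pvLast pairs (fun p => p.1 == "BANCO") with
  | some b => pvBval b
  | none => ""
def tipVA (pairs : List (String × String)) : String :=
  match pvLast pairs (fun p => p.1 == "BANCO" && 2 ≤ (PySem.Str.split₀ p.2).length) with
  | some t => (PySem.List.pyGet? (PySem.Str.split₀ t) (-1)).getD ""
  | none => ""
def tipVB (pairs : List (String × String)) : String :=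
  match pvLast pairs (fun p => p.1 == "BANCO") with
  | some b =>
    if 2 ≤ (PySem.Str.split₀ b).length then (PySem.List.pyGet? (PySem.Str.split₀ b) (-1)).getD ""
    else ""
  | none => ""

theorem pvLast_append (ps : List (String × String)) (p : String × String)
    (pred : String × String → Bool) :
    pvLast (ps ++ [p]) pred = if pred p then some p.2 else pvLast ps pred := by
  simp [pvLast, List.find?_cons]
  split <;> simp_all

theorem foldG (pairs : List (String × String)) :
    pairs.foldl pvG pvInitDict =
      mk7 (nomV pairs) (banV pairs) (tipVA pairs) (cuV pairs) (ceV pairs) := by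
  induction pairs using List.reverseRecOn with
  | nil => simp [nomV, banV, tipVA, cuV, ceV, pvLast, init_eq_mk7]
  | append_singleton ps p ih =>
    rw [List.foldl_append, List.foldl_cons, List.foldl_nil, ih]
    unfold pvG
    by_cases h1 : p.1 = "BENEFICIARIO"
    · simp [nomV, banV, tipVA, cuV, ceV, pvLast_append, h1, ins_nombre]
    · by_cases h2 : p.1 = "BANCO"
      · by_cases hlen : 2 ≤ (PySem.Str.split₀ p.2).length
        · simp [nomV, banV, tipVA, cuV, ceV, pvLast_append, h1, h2, hlen, pvBancoUpd,
            ins_banco, ins_tipo, pvBval]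
        · simp [nomV, banV, tipVA, cuV, ceV, pvLast_append, h1, h2, hlen, pvBancoUpd,
            ins_banco, pvBval]
      · by_cases h3 : p.1 = "CUENTA/CEL"
        · simp [nomV, banV, tipVA, cuV, ceV, pvLast_append, h1, h2, h3, ins_cuenta]
        · by_cases h4 : p.1 = "CED/NIT"
          · simp [nomV, banV, tipVA, cuV, ceV, pvLast_append, h1, h2, h3, h4, ins_cedula]
          · simp [nomV, banV, tipVA, cuV, ceV, pvLast_append, h1, h2, h3, h4]

theorem foldA (parts : List String) : ∀ d : PySem.Dict String String,
    parts.foldl pvStepA d = (parts.filterMap pvC).foldl pvG d := by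
  induction parts with
  | nil => intro d; rfl
  | cons part rest ih =>
    intro d
    rw [List.foldl_cons, List.filterMap_cons, stepA_eq]
    cases hc : pvC part with
    | none => simp [ih]
    | some p => simp [ih]

-- phase 1 of B as a fold over the (label, value) pairs
theorem fields_eq_foldl (parts : List String) : ∀ d : PySem.Dict String String,
    parts.foldl (fun d part =>
      let bits := (PySem.Str.splitMax? (PySem.Str.strip part) ":" 1).getD []
      if bits.length == 2 then
        d.insert (PySem.Str.upper (PySem.List.pyGetD bits 0 ""))
          (PySem.Str.strip (PySem.List.pyGetD bits 1 ""))
      else d) d =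
    (parts.filterMap pvC).foldl (fun d p => d.insert p.1 p.2) d := by
  induction parts with
  | nil => intro d; rfl
  | cons part rest ih =>
    intro d
    rw [List.foldl_cons, List.filterMap_cons]
    simp only [pvC]
    by_cases h : ((((PySem.Str.splitMax? (PySem.Str.strip part) ":" 1).getD []).length == 2) = true)
    · rw [if_pos h, if_pos h, List.foldl_cons]
      exact ih _
    · rw [if_neg h, if_neg h]
      exact ih _

theorem get?_foldl_insert (pairs : List (String × String)) (d : PySem.Dict String String)
    (k : String) :
    (pairs.foldl (fun d p => d.insert p.1 p.2) d).get? k =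
      (pvLast pairs (fun p => p.1 == k)).orElse (fun _ => d.get? k) := by
  induction pairs using List.reverseRecOn with
  | nil => simp [pvLast]
  | append_singleton ps p ih =>
    rw [List.foldl_append, List.foldl_cons, List.foldl_nil, pvLast_append,
      PySem.Dict.get?_insert]
    by_cases h : k = p.1
    · simp [h]
    · simp [h, Ne.symm h, ih]

theorem fields_get? (s : String) (k : String) :
    (pvFields s).get? k = pvLast (pvPairs s) (fun p => p.1 == k) := by
  rw [pvFields, fields_eq_foldl, ← pvPairs, get?_foldl_insert]
  cases pvLast (pvPairs s) (fun p => p.1 == k) <;> simp [PySem.Dict.get?_empty]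

theorem alt_eq (obs_str : Option String) :
    parse_obs_beneficiario_alt obs_str =
      (mk7 (nomV (pvPairs (obs_str.getD ""))) (banV (pvPairs (obs_str.getD "")))
        (tipVB (pvPairs (obs_str.getD ""))) (cuV (pvPairs (obs_str.getD "")))
        (ceV (pvPairs (obs_str.getD "")))).items := by
  unfold parse_obs_beneficiario_alt
  simp only [List.foldl_cons, List.foldl_nil, init_eq_mk7, fields_get?]
  cases hn : pvLast (pvPairs (obs_str.getD "")) (fun p => p.1 == "BENEFICIARIO") <;>
    cases hcu : pvLast (pvPairs (obs_str.getD "")) (fun p => p.1 == "CUENTA/CEL") <;>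
    cases hce : pvLast (pvPairs (obs_str.getD "")) (fun p => p.1 == "CED/NIT") <;>
    cases hb : pvLast (pvPairs (obs_str.getD "")) (fun p => p.1 == "BANCO") <;>
    simp only [hn, hcu, hce, hb, nomV, cuV, ceV, banV, tipVB, pvBval, Option.getD_some,
      Option.getD_none, ins_nombre, ins_cuenta, ins_cedula, ins_banco, ins_tipo] <;>
    first
      | rfl
      | (split_ifs <;> simp [ins_banco, ins_tipo])

-- A as the same five fields
theorem a_eq (s : String) (hs : s ≠ "") :
    parse_obs_beneficiario (some s) =
      (mk7 (nomV (pvPairs s)) (banV (pvPairs s)) (tipVA (pvPairs s)) (cuV (pvPairs s))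
        (ceV (pvPairs s))).items := by
  rw [show parse_obs_beneficiario (some s) =
      (if s = "" then pvInitDict.items
       else (((PySem.Str.split? s "|").getD []).foldl pvStepA pvInitDict).items) from rfl,
    if_neg hs, foldA, ← pvPairs, foldG]

-- List.splitOn computes Chars.splitOn for the one-char separator
theorem splitOnGo_pipe (fuel : Nat) : ∀ (l cur : List Char) (acc : List (List Char)),
    l.length < fuel →
    PySem.Chars.splitOn.go ['|'] fuel l cur acc =
      acc.reverse ++ (l.splitOn '|').modifyHead (cur.reverse ++ ·) := by
  induction fuel with
  | zero => intro l cur acc h; omega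
  | succ f ih =>
    intro l cur acc h
    cases l with
    | nil => simp [PySem.Chars.splitOn.go, List.splitOn]
    | cons c rest =>
      by_cases hc : c = '|'
      · subst hc
        rw [show PySem.Chars.splitOn.go ['|'] (f + 1) ('|' :: rest) cur acc =
            PySem.Chars.splitOn.go ['|'] f (List.drop ['|'].length ('|' :: rest)) []
              (cur.reverse :: acc) from by
          rw [PySem.Chars.splitOn.go]
          simp [List.isPrefixOf]]
        rw [show List.drop ['|'].length ('|' :: rest) = rest from rfl,
          ih rest [] (cur.reverse :: acc) (by simpa using h)]
        simp [List.splitOn, List.splitOnP_cons]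
        cases List.splitOnP (fun x => x == '|') rest <;> rfl
      · have hpre : (['|'].isPrefixOf (c :: rest)) = false := by
          simp only [List.isPrefixOf, Bool.and_eq_false_iff, beq_eq_false_iff_ne, ne_eq]
          left
          exact fun hh => hc hh.symm
        rw [show PySem.Chars.splitOn.go ['|'] (f + 1) (c :: rest) cur acc =
            PySem.Chars.splitOn.go ['|'] f rest (c :: cur) acc from by
          rw [PySem.Chars.splitOn.go]
          simp [hpre]]
        rw [ih rest (c :: cur) acc (by simpa using h)]
        simp only [List.splitOn, List.splitOnP_cons, beq_iff_eq, if_neg hc,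
          List.modifyHead_modifyHead]
        cases h' : List.splitOnP (fun b => b == '|') rest <;> simp

theorem splitOn_pipe (l : List Char) : PySem.Chars.splitOn l ['|'] = l.splitOn '|' := by
  rw [PySem.Chars.splitOn, splitOnGo_pipe (l.length + 1) l [] [] (by omega)]
  cases h : l.splitOn '|' <;> simp

-- one segment of D_'s condition, read through pvC
theorem seg_eq (part : String) :
    pvBancoSeg part.toList =
      ((pvC part).bind (fun p => if p.1 = "BANCO" then some p.2 else none)).map String.toList := by
  have hsw : PySem.Str.startswith (PySem.Str.upper (PySem.Str.strip part)) "BANCO:" = true ↔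
      ':' ∈ (PySem.Str.strip part).toList ∧
        PySem.Chars.upper (preC (PySem.Str.strip part).toList) = "BANCO".toList := by
    rw [show PySem.Str.startswith (PySem.Str.upper (PySem.Str.strip part)) "BANCO:" =
        PySem.Chars.startswith (PySem.Chars.upper (PySem.Str.strip part).toList)
          ("BANCO".toList ++ [':']) from by simp]
    exact mem_of_startswith_upper _ _ (by decide)
  have htrim : pvTrim part.toList = (PySem.Str.strip part).toList := by
    simp [pvTrim, PySem.Chars.strip, PySem.Chars.rstrip, PySem.Chars.lstrip]
  have hcond : (((pvTrim part.toList).map PySem.Chars.upperChar).take 6 = "BANCO:".toList) ↔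
      PySem.Str.startswith (PySem.Str.upper (PySem.Str.strip part)) "BANCO:" = true := by
    have hiff : PySem.Str.startswith (PySem.Str.upper (PySem.Str.strip part)) "BANCO:" = true ↔
        "BANCO:".toList <+: (PySem.Str.strip part).toList.map PySem.Chars.upperChar := by
      rw [show PySem.Str.startswith (PySem.Str.upper (PySem.Str.strip part)) "BANCO:" =
          PySem.Chars.startswith ((PySem.Str.strip part).toList.map PySem.Chars.upperChar)
            "BANCO:".toList from by simp [PySem.Chars.upper]]
      exact PySem.Chars.startswith_iff _ _
    rw [htrim, hiff, List.prefix_iff_eq_take, show ("BANCO:".toList).length = 6 from rfl]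
    exact ⟨fun hh => hh.symm, fun hh => hh.symm⟩
  by_cases hmem : ':' ∈ (PySem.Str.strip part).toList
  · have hb : PySem.Str.splitMax? (PySem.Str.strip part) ":" 1 =
        some [String.ofList (preC (PySem.Str.strip part).toList),
              String.ofList (postC (PySem.Str.strip part).toList)] := by
      rw [PySem.Str.splitMax?, show (":" : String).toList = [':'] from rfl,
        splitColon1, if_pos hmem]
      rfl
    have hget1 : PySem.List.pyGetD
        [String.ofList (preC (PySem.Str.strip part).toList),
         String.ofList (postC (PySem.Str.strip part).toList)] 1 "" =
        String.ofList (postC (PySem.Str.strip part).toList) := by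
      simp [PySem.List.pyGetD, PySem.List.pyGet?, PySem.List.pyIdx?]
    have hget0 : PySem.List.pyGetD
        [String.ofList (preC (PySem.Str.strip part).toList),
         String.ofList (postC (PySem.Str.strip part).toList)] 0 "" =
        String.ofList (preC (PySem.Str.strip part).toList) := by
      simp [PySem.List.pyGetD, PySem.List.pyGet?, PySem.List.pyIdx?]
    by_cases hU : PySem.Chars.upper (preC (PySem.Str.strip part).toList) = "BANCO".toList
    · have h1 : PySem.Str.startswith (PySem.Str.upper (PySem.Str.strip part)) "BANCO:" = true :=
        hsw.mpr ⟨hmem, hU⟩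
      have h2 : PySem.Str.upper (String.ofList (preC (PySem.Str.strip part).toList)) = "BANCO" :=
        (upper_ofList_eq_iff _ _).mpr hU
      have h2' : PySem.Str.upper (String.ofList
          (preC ((List.dropWhile PySem.Chars.isspace
            (List.dropWhile PySem.Chars.isspace part.toList).reverse).reverse))) = "BANCO" := by
        simpa [PySem.Chars.strip, PySem.Chars.rstrip, PySem.Chars.lstrip] using h2
      rw [pvBancoSeg, if_pos (hcond.mpr h1)]
      simp only [pvC, hb, Option.getD_some, List.length_cons, List.length_nil,
        show ((0 + 1 + 1 : Nat) == 2) = true from rfl, if_true, hget0, hget1]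
      rw [htrim]
      simp [h2', pvTrim, postC, PySem.Chars.strip, PySem.Chars.rstrip, PySem.Chars.lstrip]
    · have h1 : PySem.Str.startswith (PySem.Str.upper (PySem.Str.strip part)) "BANCO:" = false := by
        rw [Bool.eq_false_iff]
        intro hh
        exact hU (hsw.mp hh).2
      have h2 : ¬ PySem.Str.upper (String.ofList (preC (PySem.Str.strip part).toList)) = "BANCO" :=
        fun hh => hU ((upper_ofList_eq_iff _ _).mp hh)
      have h2' : ¬ PySem.Str.upper (String.ofList
          (preC ((List.dropWhile PySem.Chars.isspace
            (List.dropWhile PySem.Chars.isspace part.toList).reverse).reverse))) = "BANCO" := by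
        simpa [PySem.Chars.strip, PySem.Chars.rstrip, PySem.Chars.lstrip] using h2
      rw [pvBancoSeg, if_neg (fun hh => by rw [hcond] at hh; rw [h1] at hh; cases hh)]
      simp only [pvC, hb, Option.getD_some, List.length_cons, List.length_nil,
        show ((0 + 1 + 1 : Nat) == 2) = true from rfl, if_true, hget0]
      simp [h2', PySem.Chars.strip, PySem.Chars.rstrip, PySem.Chars.lstrip]
  · have h1 : PySem.Str.startswith (PySem.Str.upper (PySem.Str.strip part)) "BANCO:" = false := by
      rw [Bool.eq_false_iff]
      intro hh
      exact hmem (hsw.mp hh).1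
    have hb : PySem.Str.splitMax? (PySem.Str.strip part) ":" 1 =
        some [String.ofList (PySem.Str.strip part).toList] := by
      rw [PySem.Str.splitMax?, show (":" : String).toList = [':'] from rfl,
        splitColon1, if_neg hmem]
      rfl
    rw [pvBancoSeg, if_neg (fun hh => by rw [hcond] at hh; rw [h1] at hh; cases hh)]
    simp [pvC, hb]

-- D_'s segment values are exactly the BANCO values of pvPairs
theorem vals_eq (s : String) :
    (s.toList.splitOn '|').filterMap pvBancoSeg =
      ((pvPairs s).filterMap (fun p => if p.1 = "BANCO" then some p.2 else none)).map
        String.toList := by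
  have hparts : s.toList.splitOn '|' = ((PySem.Str.split? s "|").getD []).map String.toList := by
    rw [← splitOn_pipe]
    simp [PySem.Str.split?, PySem.Chars.split?, Function.comp_def]
  rw [hparts, List.filterMap_map, pvPairs, List.filterMap_filterMap, List.map_filterMap]
  apply List.filterMap_congr
  intro part _
  exact seg_eq part

theorem last_banco (pairs : List (String × String)) :
    pvLast pairs (fun p => p.1 == "BANCO") =
      (pairs.filterMap (fun p => if p.1 = "BANCO" then some p.2 else none)).getLast? := by
  induction pairs using List.reverseRecOn with
  | nil => simp [pvLast]
  | append_singleton ps p ih =>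
    rw [pvLast_append, List.filterMap_append]
    by_cases h : p.1 = "BANCO" <;> simp [h, ih]

theorem last_banco2 (pairs : List (String × String)) :
    pvLast pairs (fun p => p.1 == "BANCO" && 2 ≤ (PySem.Str.split₀ p.2).length) =
      ((pairs.filterMap (fun p => if p.1 = "BANCO" then some p.2 else none)).filter
        (fun v => 2 ≤ (PySem.Str.split₀ v).length)).getLast? := by
  induction pairs using List.reverseRecOn with
  | nil => simp [pvLast]
  | append_singleton ps p ih =>
    rw [pvLast_append, List.filterMap_append, List.filter_append]
    by_cases h : p.1 = "BANCO"
    · by_cases hlen : 2 ≤ (PySem.Str.split₀ p.2).length <;> simp [h, hlen, ih]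
    · simp [h, ih]

theorem tip_eq_of_not_D (s : String) (hD : ¬ D_parse_obs_beneficiario (some s)) :
    tipVA (pvPairs s) = tipVB (pvPairs s) := by
  have hlen_eq : ∀ v : String, (PySem.Chars.split₀ v.toList).length = (PySem.Str.split₀ v).length :=
    fun v => by rw [← PySem.Str.split₀_map_toList, List.length_map]
  set bv := (pvPairs s).filterMap (fun p => if p.1 = "BANCO" then some p.2 else none) with hbv
  have hvals : (s.toList.splitOn '|').filterMap pvBancoSeg = bv.map String.toList := vals_eq s
  have hD2 : ¬(bv ≠ [] ∧ (PySem.Str.split₀ (bv.getLastD "")).length < 2 ∧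
      ∃ w ∈ bv, 2 ≤ (PySem.Str.split₀ w).length) := by
    rintro ⟨h1, h2, h3⟩
    apply hD
    have hgl : (bv.map String.toList).getLastD [] = (bv.getLastD "").toList := by
      rw [List.getLastD_eq_getLast?, List.getLastD_eq_getLast?, List.getLast?_map]
      cases hg : bv.getLast? with
      | none => exact absurd (List.getLast?_eq_none_iff.mp hg) h1
      | some v => rfl
    refine ⟨?_, ?_, ?_⟩
    · rw [hvals]
      simpa using h1
    · rw [hvals, hgl, hlen_eq]
      exact h2
    · obtain ⟨w, hw, hw2⟩ := h3
      exact ⟨w.toList, by rw [hvals]; exact List.mem_map_of_mem hw, by rw [hlen_eq]; exact hw2⟩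
  unfold tipVA tipVB
  rw [last_banco, last_banco2, ← hbv]
  cases hlast : bv.getLast? with
  | none =>
    have : bv = [] := List.getLast?_eq_none_iff.mp hlast
    simp [this]
  | some v =>
    have hne : bv ≠ [] := by intro h; rw [h] at hlast; simp at hlast
    have hgd : bv.getLastD "" = v := by rw [List.getLastD_eq_getLast?, hlast]; rfl
    by_cases hlen : 2 ≤ (PySem.Str.split₀ v).length
    · have : (bv.filter (fun v => decide (2 ≤ (PySem.Str.split₀ v).length))).getLast? = some v := by
        obtain ⟨l, hl⟩ := List.getLast?_eq_some_iff.mp hlast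
        rw [hl, List.filter_append]
        simp [hlen]
      rw [this]
      simp [hlen]
    · have hno : ∀ w ∈ bv, ¬ 2 ≤ (PySem.Str.split₀ w).length := by
        intro w hw hge
        exact hD2 ⟨hne, by rw [hgd]; omega, w, hw, hge⟩
      have : bv.filter (fun v => decide (2 ≤ (PySem.Str.split₀ v).length)) = [] := by
        rw [List.filter_eq_nil_iff]
        intro w hw
        simp [hno w hw]
      rw [this]
      simp [hlen]

theorem empty_pairs : pvPairs "" = [] := by decide

theorem pyGet_neg_one_mem {α : Type} (xs : List α) (h : xs ≠ []) :
    ∃ y ∈ xs, PySem.List.pyGet? xs (-1) = some y := by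
  have hlen : 0 < xs.length := List.length_pos_iff.mpr h
  refine ⟨xs[xs.length - 1], List.getElem_mem _, ?_⟩
  simp [PySem.List.pyGet?, PySem.List.pyIdx?]
  rw [if_pos (by omega : 1 ≤ xs.length)]
  simp

theorem split0_go_ne_nil : ∀ (l cur : List Char) (acc : List (List Char)),
    (∀ a ∈ acc, a ≠ []) → ∀ x ∈ PySem.Chars.split₀.go l cur acc, x ≠ [] := by
  intro l
  induction l with
  | nil =>
    intro cur acc hacc x hx
    rw [PySem.Chars.split₀.go] at hx
    by_cases hc : cur.isEmpty
    · rw [if_pos hc] at hx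
      exact hacc x (List.mem_reverse.mp hx)
    · rw [if_neg hc] at hx
      rcases List.mem_cons.mp (List.mem_reverse.mp hx) with hh | hh
      · subst hh
        simp only [ne_eq, List.reverse_eq_nil_iff]
        intro hcur
        exact hc (by simp [hcur])
      · exact hacc x hh
  | cons c rest ih =>
    intro cur acc hacc x hx
    rw [PySem.Chars.split₀.go] at hx
    by_cases hs : PySem.Chars.isspace c
    · rw [if_pos hs] at hx
      by_cases hc : cur.isEmpty
      · rw [if_pos hc] at hx
        exact ih [] acc hacc x hx
      · rw [if_neg hc] at hx
        refine ih [] (cur.reverse :: acc) ?_ x hx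
        intro a ha
        rcases List.mem_cons.mp ha with hh | hh
        · subst hh
          simp only [ne_eq, List.reverse_eq_nil_iff]
          intro hcur
          exact hc (by simp [hcur])
        · exact hacc a hh
    · rw [if_neg hs] at hx
      exact ih (c :: cur) acc hacc x hx

theorem split0_token_ne (v x : String) (hx : x ∈ PySem.Str.split₀ v) : x ≠ "" := by
  rw [PySem.Str.split₀] at hx
  obtain ⟨cs, hcs, rfl⟩ := List.mem_map.mp hx
  rw [PySem.Chars.split₀] at hcs
  have hne : cs ≠ [] := split0_go_ne_nil v.toList [] [] (by simp) cs hcs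
  intro hh
  apply hne
  have h2 := congrArg String.toList hh
  simpa using h2

theorem D_bv (s : String) (hD : D_parse_obs_beneficiario (some s)) :
    (pvPairs s).filterMap (fun p => if p.1 = "BANCO" then some p.2 else none) ≠ [] ∧
    (PySem.Str.split₀ (((pvPairs s).filterMap
      (fun p => if p.1 = "BANCO" then some p.2 else none)).getLastD "")).length < 2 ∧
    ∃ w ∈ (pvPairs s).filterMap (fun p => if p.1 = "BANCO" then some p.2 else none),
      2 ≤ (PySem.Str.split₀ w).length := by
  have hlen_eq : ∀ v : String, (PySem.Chars.split₀ v.toList).length = (PySem.Str.split₀ v).length :=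
    fun v => by rw [← PySem.Str.split₀_map_toList, List.length_map]
  obtain ⟨h1, h2, h3⟩ := hD
  rw [vals_eq] at h1 h2 h3
  set bv := (pvPairs s).filterMap (fun p => if p.1 = "BANCO" then some p.2 else none) with hbv
  have hb1 : bv ≠ [] := by
    intro hh
    rw [hh] at h1
    exact h1 rfl
  have hgl : (bv.map String.toList).getLastD [] = (bv.getLastD "").toList := by
    rw [List.getLastD_eq_getLast?, List.getLastD_eq_getLast?, List.getLast?_map]
    cases hg : bv.getLast? with
    | none => exact absurd (List.getLast?_eq_none_iff.mp hg) hb1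
    | some v => rfl
  refine ⟨hb1, ?_, ?_⟩
  · rw [hgl, hlen_eq] at h2
    exact h2
  · obtain ⟨w, hw, hw2⟩ := h3
    obtain ⟨w', hw', rfl⟩ := List.mem_map.mp hw
    exact ⟨w', hw', by rw [hlen_eq] at hw2; exact hw2⟩

theorem tip_ne_of_D (s : String) (hD : D_parse_obs_beneficiario (some s)) :
    tipVA (pvPairs s) ≠ tipVB (pvPairs s) := by
  obtain ⟨hb1, hb2, w, hw, hw2⟩ := D_bv s hD
  set bv := (pvPairs s).filterMap (fun p => if p.1 = "BANCO" then some p.2 else none) with hbv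
  unfold tipVA tipVB
  rw [last_banco, last_banco2, ← hbv]
  cases hlast : bv.getLast? with
  | none => exact absurd (List.getLast?_eq_none_iff.mp hlast) hb1
  | some v =>
    have hgd : bv.getLastD "" = v := by rw [List.getLastD_eq_getLast?, hlast]; rfl
    have hlenv : ¬ 2 ≤ (PySem.Str.split₀ v).length := by
      rw [hgd] at hb2
      omega
    have hfne : bv.filter (fun v => decide (2 ≤ (PySem.Str.split₀ v).length)) ≠ [] := by
      intro hh
      rw [List.filter_eq_nil_iff] at hh
      exact absurd hw2 (by simpa using hh w hw)
    cases hflast : (bv.filter (fun v => decide (2 ≤ (PySem.Str.split₀ v).length))).getLast? with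
    | none => exact absurd (List.getLast?_eq_none_iff.mp hflast) hfne
    | some t =>
      have htmem : t ∈ bv.filter (fun v => decide (2 ≤ (PySem.Str.split₀ v).length)) :=
        List.mem_of_getLast? hflast
      have htlen : 2 ≤ (PySem.Str.split₀ t).length := by
        have := (List.mem_filter.mp htmem).2
        simpa using this
      have htok : PySem.Str.split₀ t ≠ [] := by
        intro hh
        rw [hh] at htlen
        simp at htlen
      obtain ⟨y, hy, hyget⟩ := pyGet_neg_one_mem (PySem.Str.split₀ t) htok
      have hyne : y ≠ "" := split0_token_ne t y hy
      simp only [hyget, Option.getD_some, hlenv, if_false]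
      simpa using hyne

-- ===== VERDICT =====
theorem parse_obs_beneficiario_spec : Claim_unchanged_parse_obs_beneficiario := by
  intro obs_str _
  intro hD
  cases obs_str with
  | none =>
    rw [alt_eq]
    rw [show parse_obs_beneficiario none = pvInitDict.items from rfl]
    rw [show ((none : Option String).getD "") = "" from rfl, empty_pairs]
    simp [nomV, cuV, ceV, banV, tipVB, pvLast, init_eq_mk7]
  | some s =>
    by_cases hs : s = ""
    · subst hs
      rw [alt_eq]
      rw [show parse_obs_beneficiario (some "") = pvInitDict.items from by rfl]
      rw [show ((some "" : Option String).getD "") = "" from rfl, empty_pairs]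
      simp [nomV, cuV, ceV, banV, tipVB, pvLast, init_eq_mk7]
    · rw [alt_eq, a_eq s hs]
      rw [show ((some s : Option String).getD "") = s from rfl]
      rw [tip_eq_of_not_D s hD]

set_option maxHeartbeats 2000000 in
theorem parse_obs_beneficiario_changed : Claim_changed_parse_obs_beneficiario := by
  unfold Claim_changed_parse_obs_beneficiario
  refine ⟨by decide, by decide, by rfl, ?_, by decide⟩
  rw [alt_eq]
  decide

set_option maxHeartbeats 1000000 in
theorem parse_obs_beneficiario_tight : Claim_exact_parse_obs_beneficiario := by
  intro obs_str _ hD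
  cases obs_str with
  | none => exact absurd hD (by decide)
  | some s =>
    by_cases hs : s = ""
    · subst hs
      exact absurd hD (by decide)
    · rw [a_eq s hs, alt_eq,
        show ((some s : Option String).getD "") = s from rfl]
      intro hh
      have := tip_ne_of_D s hD
      apply this
      simpa [mk7] using hh
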